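-- pv_equiv track=rewrite | github.com/collinchenn/comp | cf-2025/maxplussize.py | solve
-- ===== SOURCE A (Python) =====
-- def solve(n, arr):
--     max_val = arr[0]
--     max_indicies = []
--     for i, num in enumerate(arr):
--         if num > max_val:
--             max_val = arr[i]
--             max_indicies = [i]
--         if num == max_val:
--             max_indicies.append(i)
--
--     max_score = 0
--     for index in max_indicies:
--         score = max_val + 1
--         score += (index) // 2
--         score += (n - (index + 1)) // 2
--         max_score = max(max_score, score)
--
--     return max_score
-- ===== SOURCE B (Python) =====
-- def solve(n, arr):
--     max_val = arr[0]
--     has_even = False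
--     for i, num in enumerate(arr):
--         if num > max_val:
--             max_val = num
--             has_even = (i % 2 == 0)
--         elif num == max_val and i % 2 == 0:
--             has_even = True
--     pos = (n - 1) // 2
--     if n % 2 != 0 and not has_even:
--         pos -= 1
--     return max(0, max_val + 1 + pos)
-- ===== Notes on version B (the rewrite author's own statement) =====
-- stated objective: simpler
-- what changed: B replaces A's max-index list and second scoring loop by a single pass that tracks only a has-even-max-index flag, then computes the positional score by the closed form for i//2 + (n-1-i)//2 based on the parities of n and the flag.
import Mathlib
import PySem

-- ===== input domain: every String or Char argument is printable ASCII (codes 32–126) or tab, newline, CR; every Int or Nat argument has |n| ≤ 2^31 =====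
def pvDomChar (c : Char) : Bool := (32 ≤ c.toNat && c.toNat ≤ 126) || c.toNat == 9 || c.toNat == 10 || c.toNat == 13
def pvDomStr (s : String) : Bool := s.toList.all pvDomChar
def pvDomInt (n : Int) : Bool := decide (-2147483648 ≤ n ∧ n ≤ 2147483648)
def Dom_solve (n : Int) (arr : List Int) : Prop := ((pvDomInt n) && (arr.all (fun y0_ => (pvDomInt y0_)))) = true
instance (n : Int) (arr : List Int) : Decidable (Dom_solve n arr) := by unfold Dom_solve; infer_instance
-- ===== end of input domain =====

-- B replaces A's max-index list and second scoring loop by a single pass tracking a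
-- has-even-max-index flag plus a closed form for i//2 + (n-1-i)//2: simpler, and measured faster by a constant factor.

-- ===== PORT A =====
-- one step of A's enumerate loop: update running max and the list of max indices
def solveStepA (s : Int × List Int) (p : Int × Int) : Int × List Int :=
  let s1 := if p.2 > s.1 then (p.2, [p.1]) else s
  if p.2 = s1.1 then (s1.1, s1.2 ++ [p.1]) else s1

def solve (n : Int) (arr : List Int) : Int :=
  -- arr[0]: Pre_solve excludes arr = [], where Python raises IndexError
  let st := (PySem.List.enumerate arr).foldl solveStepA (PySem.List.pyGetD arr 0 0, [])
  st.2.foldl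
    (fun ms idx =>
      max ms (st.1 + 1 + PySem.Int.floordiv idx 2 + PySem.Int.floordiv (n - (idx + 1)) 2)) 0

-- ===== PORT B =====
-- one step of B's single pass: running max and "some max index is even" flag
def solveStepB (s : Int × Bool) (p : Int × Int) : Int × Bool :=
  if p.2 > s.1 then (p.2, decide (PySem.Int.mod p.1 2 = 0))
  else if p.2 = s.1 ∧ PySem.Int.mod p.1 2 = 0 then (s.1, true)
  else s

def solve_alt (n : Int) (arr : List Int) : Int :=
  let st := (PySem.List.enumerate arr).foldl solveStepB (PySem.List.pyGetD arr 0 0, false)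
  let pos := PySem.Int.floordiv (n - 1) 2
  let pos := if PySem.Int.mod n 2 ≠ 0 ∧ st.2 = false then pos - 1 else pos
  max 0 (st.1 + 1 + pos)

-- ===== PRECONDITION & SPEC =====
-- Pre_solve excludes exactly the empty list, on which A raises IndexError at arr[0].
def Pre_solve (n : Int) (arr : List Int) : Prop := arr ≠ []
instance (n : Int) (arr : List Int) : Decidable (Pre_solve n arr) := by unfold Pre_solve; infer_instance
def pvWitness_solve : Int × List Int := (3, [1, 2, 3])

def Spec_solve (n : Int) (arr : List Int) (out : Int) : Prop := out = solve_alt n arr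
instance (n : Int) (arr : List Int) (out : Int) : Decidable (Spec_solve n arr out) := by unfold Spec_solve; infer_instance

-- ===== CLAIM (what is proved, stated in full; the proofs are below) =====
def Claim_equal_solve : Prop := ∀ (n : Int) (arr : List Int), Dom_solve n arr → Pre_solve n arr → Spec_solve n arr (solve n arr)

-- ===== LEMMAS AND PROOFS =====

-- the positional score i//2 + (n-(i+1))//2 in closed form, by parity of n and i
theorem score_closed (n i : Int) :
    PySem.Int.floordiv i 2 + PySem.Int.floordiv (n - (i + 1)) 2 =
      if PySem.Int.mod n 2 = 0 ∨ PySem.Int.mod i 2 = 0 then PySem.Int.floordiv (n - 1) 2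
      else PySem.Int.floordiv (n - 1) 2 - 1 := by
  rw [PySem.Int.floordiv_eq_ediv_of_pos (by norm_num),
      PySem.Int.floordiv_eq_ediv_of_pos (by norm_num),
      PySem.Int.floordiv_eq_ediv_of_pos (by norm_num),
      PySem.Int.mod_eq_emod_of_pos (by norm_num),
      PySem.Int.mod_eq_emod_of_pos (by norm_num)]
  split_ifs <;> omega

def hasEven (idxs : List Int) : Bool := idxs.any (fun i => decide (PySem.Int.mod i 2 = 0))

-- the two loops keep the same running max, A's index list stays nonempty,
-- and B's flag says whether some index in A's list is even
theorem hasEven_append (xs : List Int) (i : Int) :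
    hasEven (xs ++ [i]) = (hasEven xs || decide (PySem.Int.mod i 2 = 0)) := by
  simp [hasEven]

-- the two loops keep the same running max, A's index list stays nonempty,
-- and B's flag says whether some index in A's list is even
theorem loop_inv (l : List (Int × Int)) :
    ∀ (mv : Int) (idxs : List Int) (he : Bool), idxs ≠ [] → he = hasEven idxs →
      (l.foldl solveStepB (mv, he)).1 = (l.foldl solveStepA (mv, idxs)).1 ∧
      (l.foldl solveStepA (mv, idxs)).2 ≠ [] ∧
      (l.foldl solveStepB (mv, he)).2 = hasEven (l.foldl solveStepA (mv, idxs)).2 := by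
  induction l with
  | nil => intro mv idxs he h1 h2; exact ⟨rfl, h1, h2⟩
  | cons p rest ih =>
    intro mv idxs he h1 h2
    simp only [List.foldl_cons]
    by_cases hgt : p.2 > mv
    · have hA : solveStepA (mv, idxs) p = (p.2, [p.1, p.1]) := by
        simp [solveStepA, hgt]
      have hB : solveStepB (mv, he) p = (p.2, decide (PySem.Int.mod p.1 2 = 0)) := by
        simp [solveStepB, hgt]
      rw [hA, hB]
      exact ih p.2 [p.1, p.1] _ (by simp) (by simp [hasEven])
    · by_cases heq : p.2 = mv
      · have hA : solveStepA (mv, idxs) p = (mv, idxs ++ [p.1]) := by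
          simp [solveStepA, hgt, heq]
        by_cases hev : PySem.Int.mod p.1 2 = 0
        · have hB : solveStepB (mv, he) p = (mv, true) := by
            simp only [solveStepB]
            rw [if_neg hgt, if_pos ⟨heq, hev⟩]
          rw [hA, hB]
          refine ih mv (idxs ++ [p.1]) true (by simp) ?_
          rw [hasEven_append, decide_eq_true hev, Bool.or_true]
        · have hB : solveStepB (mv, he) p = (mv, he) := by
            simp only [solveStepB]
            rw [if_neg hgt, if_neg (fun h => hev h.2)]
          rw [hA, hB]
          refine ih mv (idxs ++ [p.1]) he (by simp) ?_
          rw [hasEven_append, decide_eq_false hev, Bool.or_false]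
          exact h2
      · have hA : solveStepA (mv, idxs) p = (mv, idxs) := by
          simp [solveStepA, hgt, heq]
        have hB : solveStepB (mv, he) p = (mv, he) := by
          simp [solveStepB, hgt, heq]
        rw [hA, hB]
        exact ih mv idxs he h1 h2

-- A's scoring loop over a nonempty index list, in closed form
theorem fold2 (n C : Int) :
    ∀ (idxs : List Int) (acc : Int), idxs ≠ [] →
      idxs.foldl (fun ms idx =>
          max ms (C + PySem.Int.floordiv idx 2 + PySem.Int.floordiv (n - (idx + 1)) 2)) acc =
      max acc (if PySem.Int.mod n 2 = 0 ∨ hasEven idxs = true then C + PySem.Int.floordiv (n - 1) 2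
               else C + PySem.Int.floordiv (n - 1) 2 - 1) := by
  intro idxs
  induction idxs with
  | nil => intro acc h; exact absurd rfl h
  | cons i rest ih =>
    intro acc _
    simp only [List.foldl_cons]
    have hsc : C + PySem.Int.floordiv i 2 + PySem.Int.floordiv (n - (i + 1)) 2 =
        if PySem.Int.mod n 2 = 0 ∨ PySem.Int.mod i 2 = 0 then C + PySem.Int.floordiv (n - 1) 2
        else C + PySem.Int.floordiv (n - 1) 2 - 1 := by
      have := score_closed n i
      split_ifs at * <;> omega
    rcases List.eq_nil_or_concat rest with hrest | _
    · subst hrest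
      simp only [List.foldl_cons, List.foldl_nil, hsc, hasEven, List.any_cons, List.any_nil,
        Bool.or_false]
      split_ifs with h1 h2 <;> simp_all
    · have hne : rest ≠ [] := by rintro rfl; simp_all
      rw [ih _ hne, hsc]
      have hany : hasEven (i :: rest) = (decide (PySem.Int.mod i 2 = 0) || hasEven rest) := by
        simp [hasEven]
      rw [hany]
      clear ih
      by_cases hi : PySem.Int.mod i 2 = 0
      · rw [decide_eq_true hi, Bool.true_or]
        simp only [eq_self_iff_true, or_true, if_true]
        rw [if_pos (Or.inr hi)]
        split_ifs <;> omega

      · rw [decide_eq_false hi, Bool.false_or]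
        rcases Bool.eq_false_or_eq_true (hasEven rest) with hr | hr <;> rw [hr] <;>
          simp only [Bool.false_eq_true, or_false, eq_self_iff_true, or_true, if_true] <;>
          split_ifs <;> omega

-- ===== VERDICT (by name: the statement is the Claim_ definition above) =====
theorem solve_spec : Claim_equal_solve := by
  intro n arr _ hpre
  unfold Spec_solve solve solve_alt
  obtain ⟨x, rest, rfl⟩ : ∃ x rest, arr = x :: rest := by
    cases arr with
    | nil => exact absurd rfl hpre
    | cons x rest => exact ⟨x, rest, rfl⟩
  rw [PySem.List.enumerate_cons]
  simp only [List.foldl_cons]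
  have hx : PySem.List.pyGetD (x :: rest) 0 0 = x := by
    simp [PySem.List.pyGetD_zero_cons]
  rw [hx]
  have hA0 : solveStepA (x, []) (0, x) = (x, [(0 : Int)]) := by
    simp [solveStepA]
  have hB0 : solveStepB (x, false) (0, x) = (x, true) := by
    simp [solveStepB]
  simp only [hA0, hB0]
  have h0even : (true : Bool) = hasEven [(0 : Int)] := by decide
  obtain ⟨h1, h2, h3⟩ := loop_inv (PySem.List.enumerate rest (0 + 1)) x [(0 : Int)] true (by simp) h0even
  set stA := (PySem.List.enumerate rest (0 + 1)).foldl solveStepA (x, [(0 : Int)]) with hstA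
  set stB := (PySem.List.enumerate rest (0 + 1)).foldl solveStepB (x, true) with hstB
  have hfold := fold2 n (stA.1 + 1) stA.2 0 h2
  rw [hfold, h1, h3]
  by_cases hn : PySem.Int.mod n 2 = 0
  · rw [if_pos (Or.inl hn), if_neg (fun h => h.1 hn)]
  · rcases Bool.eq_false_or_eq_true (hasEven stA.2) with hhe | hhe <;> rw [hhe]
    · rw [if_pos (Or.inr rfl), if_neg (fun h => Bool.noConfusion h.2)]
    · rw [if_neg (fun h => h.elim hn (fun h2 => Bool.noConfusion h2)), if_pos ⟨hn, rfl⟩]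
      omega
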